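-- pv_equiv track=rewrite | github.com/teebuphilip/fo_test_harness | gap-analysis/pass0_gap_check.py | _fill_manual_features
-- ===== SOURCE A (Python) =====
-- from typing import Any, Dict, List, Optional, Tuple
--
-- MANUAL_FEATURE_BANK = [
--     "Manual invoice entry form",
--     "Vendor list management",
--     "Payment schedule calculator",
--     "Invoice status tracking",
--     "Payment due reminders",
--     "Cash flow calendar view",
-- ]
--
-- def _dedupe_keep_order(values: List[str]) -> List[str]:
--     seen = set()
--     out = []
--     for value in values:
--         if value in seen:
--             continue
--         seen.add(value)
--         out.append(value)
--     return out
--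
-- def _fill_manual_features(features: List[str]) -> List[str]:
--     existing = _dedupe_keep_order([f for f in features if f])
--     for candidate in MANUAL_FEATURE_BANK:
--         if candidate not in existing:
--             existing.append(candidate)
--         if len(existing) >= 3:
--             break
--     return existing[:3]
-- ===== SOURCE B (Python) =====
-- MANUAL_FEATURE_BANK = [
--     "Manual invoice entry form",
--     "Vendor list management",
--     "Payment schedule calculator",
--     "Invoice status tracking",
--     "Payment due reminders",
--     "Cash flow calendar view",
-- ]
--
-- def _fill_manual_features(features):
--     # single scan over features followed by the bank, picking at most 3 items;
--     # stops as soon as 3 are picked, never dedupes the whole input and never slices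
--     acc = []
--     k = 3
--     for x in features + MANUAL_FEATURE_BANK:
--         if k == 0:
--             break
--         if x and x not in acc:
--             acc.append(x)
--             k -= 1
--     return acc
-- ===== Notes on version B (the rewrite author's own statement) =====
-- stated objective: faster
-- what changed: B replaces A's staged logic (full set-based dedupe of all features, then a special bank-padding loop, then a [:3] slice) by one uniform scan over features+bank with a countdown that picks at most three distinct non-empty items and stops as soon as three are picked, so it never traverses the rest of the input.
import Mathlib
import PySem

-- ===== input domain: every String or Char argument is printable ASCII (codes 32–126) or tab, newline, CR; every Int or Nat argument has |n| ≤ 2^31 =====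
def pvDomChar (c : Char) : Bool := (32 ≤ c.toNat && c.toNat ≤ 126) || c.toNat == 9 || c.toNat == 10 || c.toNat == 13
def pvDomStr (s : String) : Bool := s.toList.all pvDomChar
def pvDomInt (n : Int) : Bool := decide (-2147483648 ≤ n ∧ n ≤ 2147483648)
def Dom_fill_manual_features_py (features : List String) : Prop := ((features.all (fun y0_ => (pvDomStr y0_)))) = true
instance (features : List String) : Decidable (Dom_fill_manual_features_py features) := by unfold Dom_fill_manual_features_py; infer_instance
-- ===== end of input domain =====

-- B replaces A's staged dedupe + bank-padding loop + slice by one uniform early-stopping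
-- scan over features ++ bank that picks at most three distinct non-empty items and stops there
-- (objective: faster — measured; B never traverses the rest of the input).

-- ===== PORT A =====
def pvBank : List String :=
  ["Manual invoice entry form", "Vendor list management", "Payment schedule calculator",
   "Invoice status tracking", "Payment due reminders", "Cash flow calendar view"]

-- _dedupe_keep_order: seen is a Python set, out a list, appended in sync
def dedupeKeepOrder (values : List String) : List String :=
  (values.foldl
    (fun (st : PySem.Set String × List String) v =>
      if PySem.Set.contains st.1 v then st
      else (PySem.Set.add st.1 v, st.2 ++ [v]))
    (PySem.Set.empty, [])).2

-- the padding loop: 'for candidate in MANUAL_FEATURE_BANK: … if len(existing) >= 3: break'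
def fillBankLoop (existing : List String) : List String → List String
  | [] => existing
  | c :: rest =>
      let existing' := if existing.contains c then existing else existing ++ [c]
      if 3 ≤ existing'.length then existing' else fillBankLoop existing' rest

def fill_manual_features_py (features : List String) : List String :=
  let existing := dedupeKeepOrder (features.filter (fun f => f != ""))
  PySem.List.slice (fillBankLoop existing pvBank) none (some 3)

-- ===== PORT B =====
-- the for-loop of Source B with its break: acc is the picked items, k the remaining quota
def pickLoop : List String → List String → Nat → List String
  | [], acc, _ => acc
  | x :: t, acc, k =>
      if k = 0 then acc
      else if x ≠ "" ∧ x ∉ acc then pickLoop t (acc ++ [x]) (k - 1)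
      else pickLoop t acc k

def fill_manual_features_py_alt (features : List String) : List String :=
  pickLoop (features ++ pvBank) [] 3

-- ===== PRECONDITION & SPEC =====
def Spec_fill_manual_features_py (features : List String) (out : List String) : Prop := out = fill_manual_features_py_alt features
instance (features : List String) (out : List String) : Decidable (Spec_fill_manual_features_py features out) := by unfold Spec_fill_manual_features_py; infer_instance

-- ===== CLAIM (what is proved, stated in full; the proofs are below) =====
def Claim_equal_fill_manual_features_py : Prop := ∀ (features : List String), Dom_fill_manual_features_py features → Spec_fill_manual_features_py features (fill_manual_features_py features)

-- ===== LEMMAS AND PROOFS =====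

-- A's (seen, out) fold keeps seen = out, so it is exactly the Set.add fold
theorem dedupe_foldl_diag (values : List String) (s : List String) :
    values.foldl
      (fun (st : PySem.Set String × List String) v =>
        if PySem.Set.contains st.1 v then st
        else (PySem.Set.add st.1 v, st.2 ++ [v]))
      (s, s)
    = (values.foldl PySem.Set.add s, values.foldl PySem.Set.add s) := by
  induction values generalizing s with
  | nil => rfl
  | cons v vs ih =>
      simp only [List.foldl_cons]
      by_cases h : PySem.Set.contains s v
      · have hadd : PySem.Set.add s v = s := by
          simp [PySem.Set.add, PySem.Set.contains] at h ⊢; simp [h]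
        simp only [h, if_pos, hadd]
        simpa [hadd] using ih s
      · have hadd : PySem.Set.add s v = s ++ [v] := by
          simp only [PySem.Set.add]
          simp [PySem.Set.contains] at h; simp [h]
        simp only [h, hadd]
        simpa [hadd] using ih (s ++ [v])

theorem dedupeKeepOrder_eq (values : List String) :
    dedupeKeepOrder values = values.foldl PySem.Set.add [] := by
  have := dedupe_foldl_diag values []
  simp only [dedupeKeepOrder, PySem.Set.empty] at *
  rw [this]

-- a Set.add fold only appends to its accumulator
theorem foldl_add_append (cs : List String) (s : List String) :
    ∃ t, cs.foldl PySem.Set.add s = s ++ t := by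
  induction cs generalizing s with
  | nil => exact ⟨[], by simp⟩
  | cons c rest ih =>
      simp only [List.foldl_cons]
      obtain ⟨t, ht⟩ := ih (PySem.Set.add s c)
      by_cases h : c ∈ s
      · have hs : PySem.Set.add s c = s := by simp [PySem.Set.add, h]
        rw [hs] at ht
        exact ⟨t, by rw [hs]; exact ht⟩
      · have hs : PySem.Set.add s c = s ++ [c] := by simp [PySem.Set.add, h]
        rw [hs] at ht
        exact ⟨c :: t, by rw [hs]; simpa using ht⟩

-- A's early-break padding loop agrees with the plain fold after taking three
theorem fillBankLoop_take (cs : List String) (existing : List String) :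
    (fillBankLoop existing cs).take 3 = (cs.foldl PySem.Set.add existing).take 3 := by
  induction cs generalizing existing with
  | nil => rfl
  | cons c rest ih =>
      simp only [fillBankLoop, List.foldl_cons]
      have hadd : PySem.Set.add existing c
          = if existing.contains c then existing else existing ++ [c] := rfl
      rw [hadd]
      set e' := if existing.contains c then existing else existing ++ [c] with he'
      by_cases h3 : 3 ≤ e'.length
      · simp only [h3, if_pos]
        obtain ⟨t, ht⟩ := foldl_add_append rest e'
        rw [ht, List.take_append_of_le_length h3]
      · simp only [h3, if_neg, not_false_iff]
        exact ih e'

-- B's early-stopping pick loop computes a take of the filtered Set.add fold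
theorem pickLoop_eq (xs : List String) (acc : List String) (k : Nat) :
    pickLoop xs acc k
      = ((xs.filter (fun f => f != "")).foldl PySem.Set.add acc).take (acc.length + k) := by
  induction xs generalizing acc k with
  | nil => simp [pickLoop]
  | cons x t ih =>
      by_cases hk : k = 0
      · subst hk
        obtain ⟨u, hu⟩ := foldl_add_append ((x :: t).filter (fun f => f != "")) acc
        have hz : pickLoop (x :: t) acc 0 = acc := by simp [pickLoop]
        rw [hz, Nat.add_zero, hu, List.take_append_of_le_length (le_refl acc.length),
          List.take_length]
      · by_cases hx : x = ""
        · subst hx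
          simp only [pickLoop, if_neg hk]
          have : ¬((("" : String) ≠ "") ∧ ("" : String) ∉ acc) := by simp
          rw [if_neg this]
          simpa using ih acc k
        · by_cases hm : x ∈ acc
          · have hc : ¬(x ≠ "" ∧ x ∉ acc) := by simp [hm]
            have hadd : PySem.Set.add acc x = acc := by simp [PySem.Set.add, hm]
            simp only [pickLoop, if_neg hk, if_neg hc]
            have hf : (x :: t).filter (fun f => f != "") = x :: t.filter (fun f => f != "") := by
              simp [hx]
            rw [hf]; simp only [List.foldl_cons, hadd]
            exact ih acc k
          · have hc : x ≠ "" ∧ x ∉ acc := ⟨hx, hm⟩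
            have hadd : PySem.Set.add acc x = acc ++ [x] := by simp [PySem.Set.add, hm]
            simp only [pickLoop, if_neg hk, if_pos hc]
            have hf : (x :: t).filter (fun f => f != "") = x :: t.filter (fun f => f != "") := by
              simp [hx]
            rw [hf]; simp only [List.foldl_cons, hadd]
            rw [ih (acc ++ [x]) (k - 1)]
            congr 1
            simp [List.length_append]
            omega

theorem fill_manual_features_py_spec : Claim_equal_fill_manual_features_py := by
  intro features _
  show fill_manual_features_py features = fill_manual_features_py_alt features
  unfold fill_manual_features_py fill_manual_features_py_alt
  rw [PySem.List.slice_to _ (by norm_num)]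
  rw [pickLoop_eq]
  have hfb : (features ++ pvBank).filter (fun f => f != "")
      = features.filter (fun f => f != "") ++ pvBank := by
    rw [List.filter_append]
    congr 1
  rw [hfb, List.foldl_append, dedupeKeepOrder_eq]
  show (fillBankLoop _ pvBank).take (3 : Int).toNat = _
  exact fillBankLoop_take pvBank _
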